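-- pv_equiv track=rewrite | github.com/overload127/python_mfti | algo/lab11/tusk_6.py | ferz
-- ===== SOURCE A (Python) =====
-- def ferz(n, m):
--     kletka = [['+'] * (m+1) for i in range(n+1)]
--
--     for i in range(n-1, -1, -1):
--         for j in range(m-1, -1, -1):
--             if (kletka[i+1][j+1] == '+' and
--                kletka[i][j+1] == '+' and
--                kletka[i+1][j] == '+' ):
--                 kletka[i][j] = '-'
--
--     return kletka
-- ===== SOURCE B (Python) =====
-- def ferz(n, m):
--     # closed form: cell (i, j) is losing '-' exactly when (n-i) and (m-j) are both odd
--     return [['-' if (n - i) % 2 == 1 and (m - j) % 2 == 1 else '+'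
--              for j in range(m + 1)]
--             for i in range(n + 1)]
-- ===== Notes on version B (the rewrite author's own statement) =====
-- stated objective: simpler
-- what changed: Replaced the backward dynamic-programming fill with in-place neighbour reads by a direct closed-form parity formula ((n-i) and (m-j) both odd gives '-'), built in one nested comprehension with no mutation and no second pass.
import Mathlib
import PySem

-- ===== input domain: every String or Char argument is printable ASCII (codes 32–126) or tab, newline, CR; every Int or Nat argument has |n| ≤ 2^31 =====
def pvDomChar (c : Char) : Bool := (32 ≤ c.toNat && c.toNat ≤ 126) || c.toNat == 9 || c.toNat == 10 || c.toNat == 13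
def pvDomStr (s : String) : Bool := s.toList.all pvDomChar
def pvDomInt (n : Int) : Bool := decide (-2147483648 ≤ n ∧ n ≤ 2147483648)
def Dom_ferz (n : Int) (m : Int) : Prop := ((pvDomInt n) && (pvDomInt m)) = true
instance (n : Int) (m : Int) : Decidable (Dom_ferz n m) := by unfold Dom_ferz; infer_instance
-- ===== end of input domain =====

-- B replaces A's backward DP with neighbour reads by a direct closed-form parity fill (simpler, no mutation).

-- ===== PORT A =====
-- inner loop body: the read indices are always in range when executed, so pyGetD is exact
def ferzInner (i : Int) (k : List (List String)) (j : Int) : List (List String) :=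
  if PySem.List.pyGetD (PySem.List.pyGetD k (i+1) []) (j+1) "" = "+"
     ∧ PySem.List.pyGetD (PySem.List.pyGetD k i []) (j+1) "" = "+"
     ∧ PySem.List.pyGetD (PySem.List.pyGetD k (i+1) []) j "" = "+"
  then k.set i.toNat ((PySem.List.pyGetD k i []).set j.toNat "-")
  else k

def ferzOuter (m : Int) (k : List (List String)) (i : Int) : List (List String) :=
  (PySem.List.pyRange (m-1) (-1) (-1)).foldl (ferzInner i) k

def ferz (n : Int) (m : Int) : List (List String) :=
  (PySem.List.pyRange (n-1) (-1) (-1)).foldl (ferzOuter m)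
    ((PySem.List.pyRange 0 (n+1) 1).map (fun _ => PySem.List.pyRepeat ["+"] (m+1)))

-- ===== PORT B =====
def ferz_alt (n : Int) (m : Int) : List (List String) :=
  (PySem.List.pyRange 0 (n+1) 1).map (fun i =>
    (PySem.List.pyRange 0 (m+1) 1).map (fun j =>
      if PySem.Int.mod (n-i) 2 = 1 ∧ PySem.Int.mod (m-j) 2 = 1 then "-" else "+"))

-- ===== PRECONDITION & SPEC =====
def Spec_ferz (n : Int) (m : Int) (out : List (List String)) : Prop := out = ferz_alt n m
instance (n : Int) (m : Int) (out : List (List String)) : Decidable (Spec_ferz n m out) := by unfold Spec_ferz; infer_instance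

-- ===== CLAIM (what is proved, stated in full; the proofs are below) =====
def Claim_equal_ferz : Prop := ∀ (n : Int) (m : Int), Dom_ferz n m → Spec_ferz n m (ferz n m)

-- ===== LEMMAS AND PROOFS =====

-- the closed-form cell value
def pvCell (n m i j : Int) : String :=
  if PySem.Int.mod (n-i) 2 = 1 ∧ PySem.Int.mod (m-j) 2 = 1 then "-" else "+"

-- loop state: rows below i finished, row i finished from column j on, everything else '+'
def pvRow (n m i j r : Int) : List String :=
  (PySem.List.pyRange 0 (m+1) 1).map (fun c => if r < i ∨ (r = i ∧ c < j) then "+" else pvCell n m r c)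

def pvS (n m i j : Int) : List (List String) :=
  (PySem.List.pyRange 0 (n+1) 1).map (pvRow n m i j)

theorem pvMod_two (x : Int) : PySem.Int.mod x 2 = x % 2 :=
  PySem.Int.mod_eq_emod_of_pos (by norm_num)

theorem pvCell_eq_plus (n m r c : Int) :
    pvCell n m r c = "+" ↔ ¬((n-r) % 2 = 1 ∧ (m-c) % 2 = 1) := by
  unfold pvCell
  rw [pvMod_two, pvMod_two]
  split_ifs with h
  · exact iff_of_false (by decide) (not_not_intro h)
  · exact iff_of_true rfl h

theorem pvCell_eq_minus (n m r c : Int) :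
    pvCell n m r c = "-" ↔ ((n-r) % 2 = 1 ∧ (m-c) % 2 = 1) := by
  unfold pvCell
  rw [pvMod_two, pvMod_two]
  split_ifs with h
  · exact iff_of_true rfl h
  · exact iff_of_false (by decide) h

theorem pvRow_length (n m i j r : Int) : (pvRow n m i j r).length = (m+1).toNat := by
  simp [pvRow, PySem.List.length_pyRange_one]

theorem pvS_length (n m i j : Int) : (pvS n m i j).length = (n+1).toNat := by
  simp [pvS, PySem.List.length_pyRange_one]

theorem pvRow_getElem (n m i j r : Int) (k : Nat) (hk : k < (m+1).toNat) :
    (pvRow n m i j r)[k]'(by rw [pvRow_length]; exact hk) =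
      if r < i ∨ (r = i ∧ (k : Int) < j) then "+" else pvCell n m r k := by
  simp [pvRow, PySem.List.getElem_pyRange_one]

theorem pvS_getElem (n m i j : Int) (k : Nat) (hk : k < (n+1).toNat) :
    (pvS n m i j)[k]'(by rw [pvS_length]; exact hk) = pvRow n m i j k := by
  simp [pvS, PySem.List.getElem_pyRange_one]

theorem pvRow_congr (n m i j i' j' r : Int)
    (h : ∀ c : Int, 0 ≤ c → c < m+1 →
      (if r < i ∨ (r = i ∧ c < j) then "+" else pvCell n m r c) =
      (if r < i' ∨ (r = i' ∧ c < j') then "+" else pvCell n m r c)) :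
    pvRow n m i j r = pvRow n m i' j' r := by
  unfold pvRow
  apply List.map_congr_left
  intro c hc
  rw [PySem.List.mem_pyRange_one] at hc
  exact h c hc.1 hc.2

theorem pvS_congr (n m i j i' j' : Int)
    (h : ∀ r : Int, 0 ≤ r → r < n+1 → pvRow n m i j r = pvRow n m i' j' r) :
    pvS n m i j = pvS n m i' j' := by
  unfold pvS
  apply List.map_congr_left
  intro r hr
  rw [PySem.List.mem_pyRange_one] at hr
  exact h r hr.1 hr.2

theorem pvCell_col_last (n m r : Int) : pvCell n m r m = "+" := by
  rw [pvCell_eq_plus]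
  omega

theorem pvCell_row_last (n m c : Int) : pvCell n m n c = "+" := by
  rw [pvCell_eq_plus]
  omega

theorem pvS_start (n m : Int) :
    (PySem.List.pyRange 0 (n+1) 1).map (fun _ => PySem.List.pyRepeat ["+"] (m+1)) = pvS n m (n+1) 0 := by
  unfold pvS
  apply List.map_congr_left
  intro r hr
  rw [PySem.List.mem_pyRange_one] at hr
  unfold pvRow
  rw [PySem.List.pyRepeat_singleton]
  have h1 : ∀ c ∈ PySem.List.pyRange 0 (m+1) 1,
      (fun c => if r < n+1 ∨ (r = n+1 ∧ c < 0) then "+" else pvCell n m r c) c = (fun _ => "+") c :=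
    fun c _ => if_pos (Or.inl hr.2)
  rw [List.map_congr_left h1, List.map_const', PySem.List.length_pyRange_one]
  norm_num

theorem pvS_top (n m : Int) : pvS n m (n+1) 0 = pvS n m n 0 := by
  apply pvS_congr
  intro r hr0 hr1
  apply pvRow_congr
  intro c hc0 hc1
  by_cases h : r < n
  · rw [if_pos (Or.inl (by omega)), if_pos (Or.inl h)]
  · have hrn : r = n := by omega
    rw [if_pos (Or.inl (by omega)), if_neg (by omega), hrn, pvCell_row_last]

theorem pvS_final (n m : Int) : pvS n m 0 0 = ferz_alt n m := by
  unfold pvS ferz_alt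
  apply List.map_congr_left
  intro r hr
  rw [PySem.List.mem_pyRange_one] at hr
  unfold pvRow
  apply List.map_congr_left
  intro c hc
  rw [PySem.List.mem_pyRange_one] at hc
  rw [if_neg (by omega)]
  rfl

theorem pvS_row_start (n m i j : Int) (hj : m ≤ j) : pvS n m (i+1) 0 = pvS n m i j := by
  apply pvS_congr
  intro r hr0 hr1
  apply pvRow_congr
  intro c hc0 hc1
  by_cases h : r < i
  · rw [if_pos (Or.inl (by omega)), if_pos (Or.inl h)]
  · by_cases h2 : r = i
    · subst h2
      rw [if_pos (Or.inl (by omega))]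
      by_cases h3 : c < j
      · rw [if_pos (Or.inr ⟨rfl, h3⟩)]
      · have hcm : c = m := by omega
        rw [if_neg (by omega), hcm, pvCell_col_last]
    · rw [if_neg (by omega), if_neg (by omega)]

theorem pvS_pyGetD (n m i j r : Int) (hr0 : 0 ≤ r) (hr1 : r < n+1) :
    PySem.List.pyGetD (pvS n m i j) r [] = pvRow n m i j r := by
  have h := pvS_getElem n m i j r.toNat (by omega)
  rw [Int.toNat_of_nonneg hr0] at h
  rw [PySem.List.pyGetD_eq_getElem _ _ hr0 (by rw [pvS_length]; omega)]
  exact h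

theorem pvRow_pyGetD (n m i j r c : Int) (hc0 : 0 ≤ c) (hc1 : c < m+1) :
    PySem.List.pyGetD (pvRow n m i j r) c "" =
      if r < i ∨ (r = i ∧ c < j) then "+" else pvCell n m r c := by
  have h := pvRow_getElem n m i j r c.toNat (by omega)
  rw [Int.toNat_of_nonneg hc0] at h
  rw [PySem.List.pyGetD_eq_getElem _ _ hc0 (by rw [pvRow_length]; omega)]
  exact h

theorem pvInner_step (n m i j : Int) (hi0 : 0 ≤ i) (hi : i ≤ n-1) (hj0 : 0 ≤ j) (hj : j ≤ m-1) :
    ferzInner i (pvS n m i (j+1)) j = pvS n m i j := by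
  unfold ferzInner
  rw [pvS_pyGetD n m i (j+1) (i+1) (by omega) (by omega),
      pvS_pyGetD n m i (j+1) i hi0 (by omega),
      pvRow_pyGetD n m i (j+1) (i+1) (j+1) (by omega) (by omega),
      pvRow_pyGetD n m i (j+1) i (j+1) (by omega) (by omega),
      pvRow_pyGetD n m i (j+1) (i+1) j hj0 (by omega)]
  rw [if_neg (show ¬(i+1 < i ∨ (i+1 = i ∧ j+1 < j+1)) from by omega),
      if_neg (show ¬(i < i ∨ (i = i ∧ j+1 < j+1)) from by omega),
      if_neg (show ¬(i+1 < i ∨ (i+1 = i ∧ j < j+1)) from by omega)]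
  by_cases hcond : (n-i) % 2 = 1 ∧ (m-j) % 2 = 1
  · rw [if_pos (show pvCell n m (i+1) (j+1) = "+" ∧ pvCell n m i (j+1) = "+" ∧ pvCell n m (i+1) j = "+"
        from by refine ⟨?_, ?_, ?_⟩ <;> rw [pvCell_eq_plus] <;> omega)]
    apply List.ext_getElem
    · simp [pvS_length]
    · intro k hk hk'
      rw [pvS_length] at hk'
      rw [List.getElem_set, pvS_getElem n m i j k hk']
      by_cases hki : i.toNat = k
      · rw [if_pos hki]
        have hik : (k : Int) = i := by omega
        rw [hik]
        apply List.ext_getElem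
        · simp [pvRow_length]
        · intro c hc hc'
          rw [pvRow_length] at hc'
          rw [List.getElem_set, pvRow_getElem n m i j i c hc']
          by_cases hcj : j.toNat = c
          · rw [if_pos hcj]
            have hcjj : (c : Int) = j := by omega
            rw [if_neg (by omega)]
            symm
            rw [hcjj, pvCell_eq_minus]
            exact hcond
          · rw [if_neg hcj, pvRow_getElem n m i (j+1) i c hc']
            by_cases h3 : (c : Int) < j
            · rw [if_pos (Or.inr ⟨rfl, by omega⟩), if_pos (Or.inr ⟨rfl, h3⟩)]
            · rw [if_neg (by omega), if_neg (by omega)]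
      · rw [if_neg hki, pvS_getElem n m i (j+1) k hk']
        apply pvRow_congr
        intro c hc0 hc1
        by_cases h4 : (k : Int) < i
        · rw [if_pos (Or.inl h4), if_pos (Or.inl h4)]
        · rw [if_neg (by omega), if_neg (by omega)]
  · rw [if_neg (show ¬(pvCell n m (i+1) (j+1) = "+" ∧ pvCell n m i (j+1) = "+" ∧ pvCell n m (i+1) j = "+")
        from by
          rintro ⟨h1, h2, h3⟩
          rw [pvCell_eq_plus] at h1 h2 h3
          omega)]
    apply pvS_congr
    intro r hr0 hr1
    apply pvRow_congr
    intro c hc0 hc1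
    by_cases h : r < i
    · rw [if_pos (Or.inl h), if_pos (Or.inl h)]
    · by_cases h2 : r = i
      · subst h2
        by_cases h3 : c < j
        · rw [if_pos (Or.inr ⟨rfl, by omega⟩), if_pos (Or.inr ⟨rfl, h3⟩)]
        · by_cases h4 : c = j
          · subst h4
            rw [if_pos (Or.inr ⟨rfl, by omega⟩), if_neg (by omega)]
            symm
            rw [pvCell_eq_plus]
            omega
          · rw [if_neg (by omega), if_neg (by omega)]
      · rw [if_neg (by omega), if_neg (by omega)]

theorem pvInner_loop (n m i : Int) (l : Nat) (hl : (l : Int) ≤ m) (hi0 : 0 ≤ i) (hi : i ≤ n-1) :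
    (PySem.List.pyRange ((l : Int)-1) (-1) (-1)).foldl (ferzInner i) (pvS n m i l) = pvS n m i 0 := by
  induction l with
  | zero =>
    rw [PySem.List.pyRange_neg_one_eq_nil (by omega)]
    simp
  | succ t ih =>
    rw [show ((t + 1 : Nat) : Int) = (t : Int) + 1 from by push_cast; ring]
    rw [show (t : Int) + 1 - 1 = (t : Int) from by ring]
    rw [PySem.List.pyRange_neg_one_cons (by omega), List.foldl_cons]
    rw [pvInner_step n m i t hi0 hi (by omega) (by omega)]
    exact ih (by omega)

theorem pvOuter_step (n m i : Int) (hi0 : 0 ≤ i) (hi : i ≤ n-1) :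
    ferzOuter m (pvS n m (i+1) 0) i = pvS n m i 0 := by
  unfold ferzOuter
  by_cases hm : 0 ≤ m
  · rw [pvS_row_start n m i m le_rfl]
    have h := pvInner_loop n m i m.toNat (by omega) hi0 hi
    rw [Int.toNat_of_nonneg hm] at h
    exact h
  · rw [PySem.List.pyRange_neg_one_eq_nil (by omega)]
    simp only [List.foldl_nil]
    exact pvS_row_start n m i 0 (by omega)

theorem pvOuter_loop (n m : Int) (l : Nat) (hl : (l : Int) ≤ n) :
    (PySem.List.pyRange ((l : Int)-1) (-1) (-1)).foldl (ferzOuter m) (pvS n m l 0) = pvS n m 0 0 := by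
  induction l with
  | zero =>
    rw [PySem.List.pyRange_neg_one_eq_nil (by omega)]
    simp
  | succ t ih =>
    rw [show ((t + 1 : Nat) : Int) = (t : Int) + 1 from by push_cast; ring]
    rw [show (t : Int) + 1 - 1 = (t : Int) from by ring]
    rw [PySem.List.pyRange_neg_one_cons (by omega), List.foldl_cons]
    rw [pvOuter_step n m t (by omega) (by omega)]
    exact ih (by omega)

-- ===== VERDICT (by name: the statement is the Claim_ definition above) =====
theorem ferz_spec : Claim_equal_ferz := by
  intro n m _
  show ferz n m = ferz_alt n m
  rw [ferz, pvS_start, ← pvS_final]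
  by_cases hn : 0 ≤ n
  · rw [pvS_top]
    have h := pvOuter_loop n m n.toNat (by omega)
    rw [Int.toNat_of_nonneg hn] at h
    exact h
  · rw [PySem.List.pyRange_neg_one_eq_nil (by omega : n - 1 ≤ -1)]
    simp only [List.foldl_nil]
    apply pvS_congr
    intro r hr0 hr1
    exact absurd hr1 (by omega)
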